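-- pv_equiv track=rewrite | github.com/dmitryzhurkovsky/studying | algorithms and tasks/tasks/proggraming_ml_test.py | solution
-- ===== SOURCE A (Python) =====
-- from collections import defaultdict
--
-- def solution(input_data: str) -> int:
--     tmp_letter = input_data[0]
--     count_of_letters = defaultdict(int)
--     block_number = 1
--
--     for letter in input_data:
--         if letter != tmp_letter:
--             block_number += 1
--         count_of_letters[block_number] += 1
--         tmp_letter = letter
--
--     count_of_letters = sorted(count_of_letters.items(), key=lambda x: x[1], reverse=True)
--
--     max_count_of_letters_in_one_block = count_of_letters[0][1]
--
--     result = 0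
--     for block, count_of_letters in count_of_letters[1:]:
--         result += max_count_of_letters_in_one_block - count_of_letters
--
--     return result
-- ===== SOURCE B (Python) =====
-- def solution(input_data: str) -> int:
--     # one pass over the runs: answer = (number of runs) * (longest run) - len(input_data)
--     max_run = 0
--     runs = 0
--     cur = 0
--     prev = None
--     for ch in input_data:
--         if ch == prev:
--             cur += 1
--         else:
--             runs += 1
--             cur = 1
--             prev = ch
--         if cur > max_run:
--             max_run = cur
--     return runs * max_run - len(input_data)
-- ===== Notes on version B (the rewrite author's own statement) =====
-- stated objective: faster
-- what changed: Replaces the dict-of-run-counts plus sort-descending plus second summing loop by a single pass tracking run count, current run length and maximum run length, returning runs*max_run - len(input_data), which equals the sum of (max - count) over all runs.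
import Mathlib
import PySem

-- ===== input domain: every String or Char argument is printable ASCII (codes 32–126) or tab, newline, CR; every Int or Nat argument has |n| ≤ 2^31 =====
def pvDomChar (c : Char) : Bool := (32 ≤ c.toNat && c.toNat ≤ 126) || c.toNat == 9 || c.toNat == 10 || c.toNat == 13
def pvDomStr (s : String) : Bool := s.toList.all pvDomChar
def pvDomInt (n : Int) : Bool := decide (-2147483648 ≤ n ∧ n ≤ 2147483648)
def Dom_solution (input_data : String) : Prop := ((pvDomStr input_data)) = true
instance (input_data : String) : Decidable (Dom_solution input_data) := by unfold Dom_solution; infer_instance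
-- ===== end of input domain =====

-- B replaces A's run-count dict + descending sort + summing loop by one pass computing
-- runs * max_run - len(input_data); return values proved equal on nonempty strings.

-- ===== PORT A =====
-- loop body of A's 'for letter in input_data' (state: tmp_letter, count_of_letters, block_number)
def solnStepA (st : Char × PySem.Dict Int Int × Int) (letter : Char) : Char × PySem.Dict Int Int × Int :=
  let bn : Int := if letter ≠ st.1 then st.2.2 + 1 else st.2.2
  let d := st.2.1.insert bn (st.2.1.getD bn 0 + 1)
  (letter, d, bn)

def solution (input_data : String) : Int :=
  match PySem.Str.pyGet? input_data 0 with
  | none => 0  -- input_data[0] raises IndexError here; excluded by Pre_solution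
  | some tmp0 =>
    let st := input_data.toList.foldl solnStepA (tmp0, PySem.Dict.empty, 1)
    let items := PySem.List.sorted st.2.1.items (fun x => x.2) true
    match PySem.List.pyGet? items 0 with
    | none => 0  -- unreachable: the dict is nonempty when the string is
    | some top =>
      (PySem.List.slice items (some 1) none).foldl (fun r p => r + (top.2 - p.2)) 0

-- ===== PORT B =====
-- loop body of B's single pass (state: max_run, runs, cur, prev)
def solnStepB (st : Int × Int × Int × Option Char) (ch : Char) : Int × Int × Int × Option Char :=
  let t := if some ch == st.2.2.2 then (st.2.1, st.2.2.1 + 1, st.2.2.2) else (st.2.1 + 1, 1, some ch)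
  let mx := if t.2.1 > st.1 then t.2.1 else st.1
  (mx, t)

def solution_alt (input_data : String) : Int :=
  let st := input_data.toList.foldl solnStepB (0, 0, 0, none)
  st.2.1 * st.1 - PySem.Str.len input_data

-- ===== PRECONDITION & SPEC =====
-- Pre_ excludes only the empty string, on which A raises IndexError at input_data[0].
def Pre_solution (input_data : String) : Prop := input_data ≠ ""
instance (input_data : String) : Decidable (Pre_solution input_data) := by unfold Pre_solution; infer_instance
def pvWitness_solution : String := "aabcc"

def Spec_solution (input_data : String) (out : Int) : Prop := out = solution_alt input_data
instance (input_data : String) (out : Int) : Decidable (Spec_solution input_data out) := by unfold Spec_solution; infer_instance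

-- ===== CLAIM (what is proved, stated in full; the proofs are below) =====
def Claim_equal_solution : Prop := ∀ (input_data : String), Dom_solution input_data → Pre_solution input_data → Spec_solution input_data (solution input_data)

-- ===== LEMMAS AND PROOFS =====

-- abstract run accumulator shared by both loop invariants:
-- state (current character, lengths of the finished runs, length of the current run)
def runStep (st : Char × List Int × Int) (ch : Char) : Char × List Int × Int :=
  if ch = st.1 then (st.1, st.2.1, st.2.2 + 1) else (ch, st.2.1 ++ [st.2.2], 1)

lemma nodup_fst_enumerate (vals : List Int) (s : Int) :
    ((PySem.List.enumerate vals s).map Prod.fst).Nodup := by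
  have h := PySem.List.pairwise_lt_enumerate vals s
  exact (List.pairwise_map.mpr h).imp ne_of_lt

lemma fst_enumerate_lt (vals : List Int) (s : Int) {p : Int × Int}
    (hp : p ∈ PySem.List.enumerate vals s) : s ≤ p.1 ∧ p.1 < s + vals.length := by
  rcases (PySem.List.mem_enumerate_iff _ _ _).1 hp with ⟨k, hk, rfl⟩
  simp; omega

lemma enum_snoc (vs : List Int) (cur : Int) :
    PySem.List.enumerate (vs ++ [cur]) 1 = PySem.List.enumerate vs 1 ++ [((vs.length : Int) + 1, cur)] := by
  rw [PySem.List.enumerate_append]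
  simp [PySem.List.enumerate_cons, PySem.List.enumerate_nil, add_comm]

lemma dict_getD_last (vs : List Int) (cur : Int) :
    (PySem.Dict.mk (PySem.List.enumerate (vs ++ [cur]) 1)).getD ((vs.length : Int) + 1) 0 = cur := by
  apply PySem.Dict.getD_of_mem_items
  · show _ ∈ PySem.List.enumerate (vs ++ [cur]) 1
    rw [enum_snoc]; simp
  · show ((PySem.List.enumerate (vs ++ [cur]) 1).map Prod.fst).Nodup
    exact nodup_fst_enumerate _ _

lemma dict_not_contains (vs : List Int) (cur : Int) :
    (PySem.Dict.mk (PySem.List.enumerate (vs ++ [cur]) 1)).contains ((vs.length : Int) + 1 + 1) = false := by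
  by_contra h
  have h' : ((vs.length : Int) + 1 + 1) ∈ (PySem.Dict.mk (PySem.List.enumerate (vs ++ [cur]) 1)).keys := by
    rw [← PySem.Dict.contains_iff_mem_keys]
    simpa using h
  have h2 : ((vs.length : Int) + 1 + 1) ∈ (PySem.List.enumerate (vs ++ [cur]) 1).map Prod.fst := h'
  rcases List.mem_map.1 h2 with ⟨p, hp, hfst⟩
  have := fst_enumerate_lt (vs ++ [cur]) 1 hp
  simp at this
  omega

-- insert at the last existing key bumps the last run length
lemma dict_insert_last (vs : List Int) (cur v : Int) :
    (PySem.Dict.mk (PySem.List.enumerate (vs ++ [cur]) 1)).insert ((vs.length : Int) + 1) v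
    = PySem.Dict.mk (PySem.List.enumerate (vs ++ [v]) 1) := by
  apply PySem.Dict.ext
  have hcont : (PySem.Dict.mk (PySem.List.enumerate (vs ++ [cur]) 1)).contains ((vs.length : Int) + 1) = true := by
    rw [PySem.Dict.contains_iff_mem_keys]
    show _ ∈ (PySem.List.enumerate (vs ++ [cur]) 1).map Prod.fst
    rw [enum_snoc]; simp
  rw [PySem.Dict.items_insert_of_contains _ _ hcont]
  show (PySem.List.enumerate (vs ++ [cur]) 1).map _ = PySem.List.enumerate (vs ++ [v]) 1
  rw [enum_snoc, enum_snoc, List.map_append]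
  congr 1
  · apply List.map_congr_left ?_ |>.trans (List.map_id _)
    intro p hp
    have := fst_enumerate_lt vs 1 hp
    have hne : (p.1 == (vs.length : Int) + 1) = false := by
      simp only [beq_eq_false_iff_ne]; omega
    simp [hne]
  · simp

-- insert at a fresh key appends a new run of length 1
lemma dict_insert_fresh (vs : List Int) (cur : Int) :
    (PySem.Dict.mk (PySem.List.enumerate (vs ++ [cur]) 1)).insert ((vs.length : Int) + 1 + 1) 1
    = PySem.Dict.mk (PySem.List.enumerate ((vs ++ [cur]) ++ [1]) 1) := by
  apply PySem.Dict.ext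
  rw [PySem.Dict.items_insert_of_not_contains _ _ (dict_not_contains vs cur)]
  show PySem.List.enumerate (vs ++ [cur]) 1 ++ _ = _
  rw [enum_snoc (vs ++ [cur]) 1]
  congr 2
  simp

-- A's loop keeps the dict equal to the 1-based enumeration of the run lengths
lemma A_loop (rest : List Char) (tmp : Char) (vs : List Int) (cur : Int) :
    List.foldl solnStepA (tmp, PySem.Dict.mk (PySem.List.enumerate (vs ++ [cur]) 1), (vs.length : Int) + 1) rest
    = ((List.foldl runStep (tmp, vs, cur) rest).1,
       PySem.Dict.mk (PySem.List.enumerate ((List.foldl runStep (tmp, vs, cur) rest).2.1 ++ [(List.foldl runStep (tmp, vs, cur) rest).2.2]) 1),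
       ((List.foldl runStep (tmp, vs, cur) rest).2.1.length : Int) + 1) := by
  induction rest generalizing tmp vs cur with
  | nil => rfl
  | cons ch rest ih =>
    simp only [List.foldl_cons]
    by_cases h : ch = tmp
    · have hA : solnStepA (tmp, PySem.Dict.mk (PySem.List.enumerate (vs ++ [cur]) 1), (vs.length : Int) + 1) ch
          = (ch, PySem.Dict.mk (PySem.List.enumerate (vs ++ [cur + 1]) 1), (vs.length : Int) + 1) := by
        simp only [solnStepA, h, ne_eq, not_true_eq_false, if_false]
        rw [dict_getD_last, dict_insert_last]
      rw [hA]
      have hR : runStep (tmp, vs, cur) ch = (tmp, vs, cur + 1) := by simp [runStep, h]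
      rw [hR, h, ih]
    · have hA : solnStepA (tmp, PySem.Dict.mk (PySem.List.enumerate (vs ++ [cur]) 1), (vs.length : Int) + 1) ch
          = (ch, PySem.Dict.mk (PySem.List.enumerate ((vs ++ [cur]) ++ [1]) 1), (vs.length : Int) + 1 + 1) := by
        simp only [solnStepA, ne_eq, h, not_false_eq_true, if_pos]
        rw [PySem.Dict.getD_of_not_contains _ _ (dict_not_contains vs cur)]
        rw [show (0 : Int) + 1 = 1 by ring, dict_insert_fresh]
      rw [hA]
      have hR : runStep (tmp, vs, cur) ch = (ch, vs ++ [cur], 1) := by simp [runStep, h]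
      rw [hR]
      have := ih ch (vs ++ [cur]) 1
      rw [show ((vs ++ [cur]).length : Int) + 1 = (vs.length : Int) + 1 + 1 by simp] at this
      rw [this]

-- run lengths stay ≥ 1
lemma run_pos (rest : List Char) (tmp : Char) (vs : List Int) (cur : Int)
    (hcur : 1 ≤ cur) (hvs : ∀ v ∈ vs, 1 ≤ v) :
    1 ≤ (List.foldl runStep (tmp, vs, cur) rest).2.2 ∧
    ∀ v ∈ (List.foldl runStep (tmp, vs, cur) rest).2.1, 1 ≤ v := by
  induction rest generalizing tmp vs cur with
  | nil => exact ⟨hcur, hvs⟩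
  | cons ch rest ih =>
    simp only [List.foldl_cons, runStep]
    split
    · exact ih tmp vs (cur + 1) (by omega) hvs
    · refine ih ch (vs ++ [cur]) 1 le_rfl ?_
      intro v hv
      rcases List.mem_append.1 hv with h | h
      · exact hvs v h
      · simp at h; omega

-- total length processed = sum of run lengths
lemma run_sum (rest : List Char) (tmp : Char) (vs : List Int) (cur : Int) :
    ((List.foldl runStep (tmp, vs, cur) rest).2.1 ++ [(List.foldl runStep (tmp, vs, cur) rest).2.2]).sum
    = (vs ++ [cur]).sum + rest.length := by
  induction rest generalizing tmp vs cur with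
  | nil => simp
  | cons ch rest ih =>
    simp only [List.foldl_cons, runStep]
    split
    · rw [ih]; simp; omega
    · rw [ih]; simp; omega

lemma foldmax_snoc (vs : List Int) (x : Int) : (vs ++ [x]).foldl max 0 = max (vs.foldl max 0) x := by
  simp [List.foldl_append]

-- B's loop tracks the running maximum and the number of runs
lemma B_loop (rest : List Char) (tmp : Char) (vs : List Int) (cur : Int)
    (hcur : 1 ≤ cur) (hvs : ∀ v ∈ vs, 1 ≤ v) :
    List.foldl solnStepB ((vs ++ [cur]).foldl max 0, (vs.length : Int) + 1, cur, some tmp) rest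
    = (((List.foldl runStep (tmp, vs, cur) rest).2.1 ++ [(List.foldl runStep (tmp, vs, cur) rest).2.2]).foldl max 0,
       ((List.foldl runStep (tmp, vs, cur) rest).2.1.length : Int) + 1,
       (List.foldl runStep (tmp, vs, cur) rest).2.2,
       some (List.foldl runStep (tmp, vs, cur) rest).1) := by
  induction rest generalizing tmp vs cur with
  | nil => rfl
  | cons ch rest ih =>
    simp only [List.foldl_cons]
    by_cases h : ch = tmp
    · subst h
      have hB : solnStepB ((vs ++ [cur]).foldl max 0, (vs.length : Int) + 1, cur, some ch) ch
          = ((vs ++ [cur + 1]).foldl max 0, (vs.length : Int) + 1, cur + 1, some ch) := by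
        simp only [solnStepB, beq_self_eq_true, if_true]
        rw [foldmax_snoc, foldmax_snoc]
        simp only [Prod.mk.injEq, and_true]
        omega
      have hR : runStep (ch, vs, cur) ch = (ch, vs, cur + 1) := by simp [runStep]
      rw [hB, hR, ih ch vs (cur + 1) (by omega) hvs]
    · have hb : (some ch == some tmp) = false := by simp [h]
      have hB : solnStepB ((vs ++ [cur]).foldl max 0, (vs.length : Int) + 1, cur, some tmp) ch
          = (((vs ++ [cur]) ++ [1]).foldl max 0, ((vs ++ [cur]).length : Int) + 1, 1, some ch) := by
        simp only [solnStepB, hb, Bool.false_eq_true, if_false]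
        rw [foldmax_snoc (vs ++ [cur]), foldmax_snoc vs cur]
        simp only [Prod.mk.injEq, and_true]
        refine ⟨by omega, by simp⟩
      have hR : runStep (tmp, vs, cur) ch = (ch, vs ++ [cur], 1) := by simp [runStep, h]
      rw [hB, hR, ih ch (vs ++ [cur]) 1 le_rfl ?_]
      intro v hv
      rcases List.mem_append.1 hv with h' | h'
      · exact hvs v h'
      · simp at h'; omega

lemma sum_map_sub (t : List (Int × Int)) (c : Int) :
    (t.map (fun p => c - p.2)).sum = t.length * c - (t.map (fun p => p.2)).sum := by
  induction t with
  | nil => simp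
  | cons x t ih => simp [ih]; ring

-- the value A computes from the sorted run lengths equals k * max - sum
lemma sorted_phase (vals : List Int) (hne : vals ≠ []) (hpos : ∀ v ∈ vals, 1 ≤ v) :
    (match PySem.List.pyGet? (PySem.List.sorted (PySem.List.enumerate vals 1) (fun x => x.2) true) 0 with
     | none => 0
     | some top =>
       (PySem.List.slice (PySem.List.sorted (PySem.List.enumerate vals 1) (fun x => x.2) true) (some 1) none).foldl
         (fun r p => r + (top.2 - p.2)) 0)
    = (vals.length : Int) * (vals.foldl max 0) - vals.sum := by
  have hssne : PySem.List.sorted (PySem.List.enumerate vals 1) (fun x => x.2) true ≠ [] := by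
    rw [Ne, PySem.List.sorted_eq_nil_iff]
    intro h
    have h2 := PySem.List.length_enumerate vals 1
    rw [h] at h2
    exact hne (List.length_eq_zero_iff.mp h2.symm)
  obtain ⟨m, t, hms⟩ := List.exists_cons_of_ne_nil hssne
  rw [hms]
  simp only [PySem.List.pyGet?_zero_cons, PySem.List.slice_from_one, List.tail_cons]
  rw [PySem.List.foldl_add t (fun p => m.2 - p.2) 0, sum_map_sub]
  have hperm := PySem.List.sorted_perm (PySem.List.enumerate vals 1) (fun x => x.2) true
  rw [hms] at hperm
  have hsum : m.2 + (t.map (fun p => p.2)).sum = vals.sum := by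
    have h3 := (hperm.map (fun p : Int × Int => p.2)).sum_eq
    simpa [PySem.List.map_snd_enumerate] using h3
  have hlen : (t.length : Int) = (vals.length : Int) - 1 := by
    have h1 := PySem.List.length_sorted (PySem.List.enumerate vals 1) (fun x => x.2) true
    rw [hms] at h1
    rw [PySem.List.length_enumerate] at h1
    simp at h1
    omega
  have hub : ∀ v ∈ vals, v ≤ m.2 := by
    intro v hv
    rw [← PySem.List.map_snd_enumerate vals 1] at hv
    rcases List.mem_map.1 hv with ⟨y, hy, rfl⟩
    exact PySem.List.key_head_sorted_rev_ge _ _ hms y hy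
  have hmem : m.2 ∈ vals := by
    have hm : m ∈ PySem.List.enumerate vals 1 := hperm.mem_iff.mp (by simp)
    rw [← PySem.List.map_snd_enumerate vals 1]
    exact List.mem_map_of_mem hm
  have hmax : m.2 = vals.foldl max 0 := by
    apply le_antisymm
    · exact (PySem.List.le_foldl_max vals 0).2 m.2 hmem
    · rcases PySem.List.foldl_max_mem vals 0 with h0 | hm
      · rw [h0]; have := hpos m.2 hmem; omega
      · exact hub _ hm
  have hts : (t.map (fun p => p.2)).sum = vals.sum - m.2 := by omega
  rw [hts, hlen, hmax]
  ring

-- ===== VERDICT (by name: the statement is the Claim_ definition above) =====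
theorem solution_spec : Claim_equal_solution := by
  unfold Claim_equal_solution
  intro s _ hpre
  unfold Spec_solution
  obtain ⟨c0, cs, hcs⟩ : ∃ c0 cs, s.toList = c0 :: cs := by
    rcases h : s.toList with _ | ⟨c, cs⟩
    · exact absurd (String.toList_eq_nil_iff.mp h) hpre
    · exact ⟨c, cs, rfl⟩
  have hget : PySem.Str.pyGet? s 0 = some c0 := by
    simp [PySem.Str.pyGet?, hcs]
  -- first loop iteration on both sides
  have hA1 : solnStepA (c0, PySem.Dict.empty, 1) c0
      = (c0, PySem.Dict.mk (PySem.List.enumerate (([] : List Int) ++ [1]) 1), ((List.length ([] : List Int) : Int)) + 1) := by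
    simp only [solnStepA, ne_eq, not_true_eq_false, if_false]
    rfl
  have hB1 : solnStepB (0, 0, 0, none) c0
      = ((([] : List Int) ++ [1]).foldl max 0, ((List.length ([] : List Int) : Int)) + 1, 1, some c0) := by
    simp [solnStepB]
  have hpos := run_pos cs c0 [] 1 le_rfl (by simp)
  have hvpos : ∀ v ∈ (List.foldl runStep (c0, [], 1) cs).2.1 ++ [(List.foldl runStep (c0, [], 1) cs).2.2], 1 ≤ v := by
    intro v hv
    rcases List.mem_append.1 hv with h | h
    · exact hpos.2 v h
    · simp at h; omega
  have hvne : (List.foldl runStep (c0, [], 1) cs).2.1 ++ [(List.foldl runStep (c0, [], 1) cs).2.2] ≠ [] := by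
    simp
  have hsum := run_sum cs c0 [] 1
  -- evaluate A
  show solution s = solution_alt s
  rw [solution, solution_alt, hget, hcs]
  simp only [List.foldl_cons]
  rw [hA1, hB1, A_loop cs c0 [] 1, B_loop cs c0 [] 1 le_rfl (by simp)]
  have hitems : (PySem.Dict.mk (PySem.List.enumerate
      ((List.foldl runStep (c0, [], 1) cs).2.1 ++ [(List.foldl runStep (c0, [], 1) cs).2.2]) 1)).items
      = PySem.List.enumerate ((List.foldl runStep (c0, [], 1) cs).2.1 ++ [(List.foldl runStep (c0, [], 1) cs).2.2]) 1 := rfl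
  rw [hitems, sorted_phase _ hvne hvpos]
  rw [PySem.Str.len_eq, hcs]
  rw [show ((List.foldl runStep (c0, [], 1) cs).2.1 ++ [(List.foldl runStep (c0, [], 1) cs).2.2]).length
      = (List.foldl runStep (c0, [], 1) cs).2.1.length + 1 by simp]
  simp only [List.sum_append, List.sum_cons, List.sum_nil] at hsum
  have hsum' : ((List.foldl runStep (c0, [], 1) cs).2.1 ++ [(List.foldl runStep (c0, [], 1) cs).2.2]).sum
      = (cs.length : Int) + 1 := by
    simp only [List.sum_append, List.sum_cons, List.sum_nil]
    omega
  rw [hsum']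
  simp only [List.length_cons]
  push_cast
  ring
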